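-- pv_equiv track=rewrite | github.com/andriantobastian/kriptografi | app.py | super_encrypt
-- ===== SOURCE A (Python) =====
-- def vigenere_encrypt(plain_text, key):
--     key = key.lower()
--     encrypted = []
--     for i, char in enumerate(plain_text.lower()):
--         if char.isalpha():
--             shift = ord(key[i % len(key)]) - ord('a')
--             encrypted.append(
--                 chr((ord(char) - ord('a') + shift) % 26 + ord('a')))
--     return ''.join(encrypted)
--
-- def super_encrypt(plain_text, key):
--     vigenere_encrypted = vigenere_encrypt(plain_text, key)
--     num_cols = len(key)
--     num_rows = (len(vigenere_encrypted) + num_cols - 1) // num_cols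
--     padded_text = vigenere_encrypted.ljust(num_rows * num_cols)
--     columns = ['' for _ in range(num_cols)]
--     for i in range(num_rows):
--         for j in range(num_cols):
--             columns[j] += padded_text[i * num_cols + j]
--     ciphertext = ''.join(columns)
--     return ciphertext
-- ===== SOURCE B (Python) =====
-- def super_encrypt(plain_text, key):
--     k = key.lower()
--     n = len(key)
--     encrypted = ''.join(
--         chr((ord(c) - 2 * ord('a') + ord(k[i % n])) % 26 + ord('a'))
--         for i, c in enumerate(plain_text.lower()) if c.isalpha())
--     num_rows = (len(encrypted) + n - 1) // n
--     padded = encrypted.ljust(num_rows * n)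
--     return ''.join(padded[j::n] for j in range(n))
-- ===== Notes on version B (the rewrite author's own statement) =====
-- stated objective: idiomatic
-- what changed: Vigenere becomes a single filtering comprehension instead of an append loop, and the columnar transposition reads each column with one strided slice padded[j::n] instead of the nested row/column loop that mutates a list of column accumulators.
import Mathlib
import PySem

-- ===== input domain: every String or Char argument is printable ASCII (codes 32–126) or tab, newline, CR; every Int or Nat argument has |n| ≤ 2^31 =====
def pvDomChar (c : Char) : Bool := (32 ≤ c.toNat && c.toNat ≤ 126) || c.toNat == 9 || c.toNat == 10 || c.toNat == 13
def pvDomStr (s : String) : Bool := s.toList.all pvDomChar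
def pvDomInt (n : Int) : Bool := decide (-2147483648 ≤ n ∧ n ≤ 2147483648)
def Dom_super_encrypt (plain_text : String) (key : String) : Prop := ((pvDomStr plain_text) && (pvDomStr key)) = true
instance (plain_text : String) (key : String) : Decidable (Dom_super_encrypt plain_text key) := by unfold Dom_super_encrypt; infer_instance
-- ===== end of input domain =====

-- B replaces A's append-loop Vigenère by a filtering comprehension and A's nested
-- row/column transposition loop by one strided slice per column (idiomatic rewrite).

-- ===== PORT A =====
-- vigenere_encrypt of A: lower the key, loop over enumerate(plain.lower()), append one char per alpha char.
def pvVigA (plain : List Char) (key : List Char) : List Char :=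
  let key := PySem.Chars.lower key
  (PySem.List.enumerate (PySem.Chars.lower plain) 0).foldl
    (fun acc p =>
      if PySem.Chars.isalpha p.2 then
        acc ++ [Char.ofNat ((PySem.Int.mod (((p.2.toNat : Int) - 97) +
                  (((PySem.List.pyGetD key (PySem.Int.mod p.1 (key.length : Int)) 'a').toNat : Int) - 97)) 26 + 97).toNat)]
      else acc) []

def super_encrypt (plain_text : String) (key : String) : String :=
  let v := pvVigA plain_text.toList key.toList
  let numCols : Int := (key.toList.length : Int)
  let numRows : Int := PySem.Int.floordiv ((v.length : Int) + numCols - 1) numCols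
  -- str.ljust(w) ported by hand: pad on the right with spaces up to width w (exact; Nat subtraction clamps like ljust does)
  let padded := v ++ List.replicate ((numRows * numCols).toNat - v.length) ' '
  let columns := (PySem.List.pyRange 0 numRows 1).foldl
    (fun cols i => (PySem.List.pyRange 0 numCols 1).foldl
      (fun cols j => cols.set j.toNat
        (PySem.List.pyGetD cols j [] ++ [PySem.List.pyGetD padded (i * numCols + j) ' '])) cols)
    (List.replicate numCols.toNat ([] : List Char))
  String.ofList (PySem.Chars.join [] columns)

-- ===== PORT B =====
-- B's Vigenère: filter the alpha positions of enumerate(plain.lower()), then map the shift formula.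
def pvVigB (plain : List Char) (key : List Char) : List Char :=
  let k := PySem.Chars.lower key
  let n : Int := (key.length : Int)
  ((PySem.List.enumerate (PySem.Chars.lower plain) 0).filter (fun p => PySem.Chars.isalpha p.2)).map
    (fun p => Char.ofNat ((PySem.Int.mod ((p.2.toNat : Int) - 194 +
                ((PySem.List.pyGetD k (PySem.Int.mod p.1 n) 'a').toNat : Int)) 26 + 97).toNat))

def super_encrypt_alt (plain_text : String) (key : String) : String :=
  let enc := pvVigB plain_text.toList key.toList
  let n : Int := (key.toList.length : Int)
  let numRows : Int := PySem.Int.floordiv ((enc.length : Int) + n - 1) n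
  -- str.ljust(w) ported by hand as in A's port (exact)
  let padded := enc ++ List.replicate ((numRows * n).toNat - enc.length) ' '
  String.ofList (PySem.Chars.join []
    ((PySem.List.pyRange 0 n 1).map (fun j => (PySem.List.slice? padded (some j) none n).getD [])))

-- ===== PRECONDITION & SPEC =====
-- Pre_ excludes only the empty key, on which A raises (ZeroDivisionError, or IndexError in vigenere_encrypt).
def Pre_super_encrypt (plain_text : String) (key : String) : Prop := key ≠ ""
instance (plain_text : String) (key : String) : Decidable (Pre_super_encrypt plain_text key) := by
  unfold Pre_super_encrypt; infer_instance

def pvWitness_super_encrypt : String × String := ("attack at dawn!", "Lemon")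

def Spec_super_encrypt (plain_text : String) (key : String) (out : String) : Prop := out = super_encrypt_alt plain_text key
instance (plain_text : String) (key : String) (out : String) : Decidable (Spec_super_encrypt plain_text key out) := by unfold Spec_super_encrypt; infer_instance

-- ===== CLAIM (what is proved, stated in full; the proofs are below) =====
def Claim_equal_super_encrypt : Prop := ∀ (plain_text : String) (key : String), Dom_super_encrypt plain_text key → Pre_super_encrypt plain_text key → Spec_super_encrypt plain_text key (super_encrypt plain_text key)

-- ===== LEMMAS AND PROOFS =====

-- the canonical column j read row by row
def pvCol (padded : List Char) (C : Int) (R : Nat) (j : Int) : List Char :=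
  (List.range R).map (fun r : Nat => PySem.List.pyGetD padded ((r : Int) * C + j) ' ')

-- The two Vigenère ports agree (the shift arithmetic is the same Int expression).
lemma pvVig_eq (plain key : List Char) : pvVigA plain key = pvVigB plain key := by
  unfold pvVigA pvVigB
  rw [PySem.List.foldl_append_if]
  simp only [List.nil_append, PySem.Chars.lower, List.length_map]
  apply List.map_congr_left
  intro p _
  congr 3 <;> first | rfl | (congr 1 <;> first | rfl | omega)

-- A's inner column loop, started from a map over range(C), appends g j to every column j ≥ a.
lemma pvInner (g : Int → List Char) (C : Int) :
    ∀ (n : Nat) (a : Int) (f : Int → List Char), 0 ≤ a → (C - a).toNat = n →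
    (PySem.List.pyRange a C 1).foldl
      (fun cols j => cols.set j.toNat (PySem.List.pyGetD cols j [] ++ g j))
      ((PySem.List.pyRange 0 C 1).map f)
    = (PySem.List.pyRange 0 C 1).map (fun j => if a ≤ j then f j ++ g j else f j) := by
  intro n
  induction n with
  | zero =>
    intro a f ha hn
    rw [PySem.List.pyRange_one_eq_nil (show C ≤ a by omega)]
    simp only [List.foldl_nil]
    apply List.map_congr_left
    intro j hj
    rw [PySem.List.mem_pyRange_one] at hj
    rw [if_neg (by omega)]
  | succ n ih =>
    intro a f ha hn
    have hac : a < C := by omega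
    rw [PySem.List.pyRange_one_cons hac]
    simp only [List.foldl_cons]
    have hstep : ((PySem.List.pyRange 0 C 1).map f).set a.toNat
        (PySem.List.pyGetD ((PySem.List.pyRange 0 C 1).map f) a [] ++ g a)
        = (PySem.List.pyRange 0 C 1).map (fun j => if j = a then f a ++ g a else f j) := by
      rw [PySem.List.pyGetD_map_pyRange_of_nonneg f C a [] ha hac]
      apply List.ext_getElem
      · simp
      · intro k h1 h2
        simp only [List.length_map, PySem.List.length_pyRange_one] at h2
        simp only [List.getElem_set, List.getElem_map, PySem.List.getElem_pyRange_one]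
        by_cases hka : a.toNat = k
        · rw [if_pos hka, if_pos (by omega)]
        · rw [if_neg hka, if_neg (by omega)]
    rw [hstep, ih (a + 1) _ (by omega) (by omega)]
    apply List.map_congr_left
    intro j hj
    rw [PySem.List.mem_pyRange_one] at hj
    by_cases hja : j = a
    · subst hja
      rw [if_neg (by omega : ¬ j + 1 ≤ j), if_pos rfl, if_pos (le_refl j)]
    · rw [show (if j = a then f a ++ g a else f j) = f j from if_neg hja]
      by_cases hj2 : a + 1 ≤ j
      · rw [if_pos hj2, if_pos (by omega)]
      · rw [if_neg hj2, if_neg (by omega)]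

-- A's nested row/column loop builds exactly the canonical columns.
lemma pvOuter (padded : List Char) (C : Int) (hC : 0 < C) :
    ∀ (R : Nat),
    (PySem.List.pyRange 0 (R : Int) 1).foldl
      (fun cols i => (PySem.List.pyRange 0 C 1).foldl
        (fun cols j => cols.set j.toNat
          (PySem.List.pyGetD cols j [] ++ [PySem.List.pyGetD padded (i * C + j) ' '])) cols)
      (List.replicate C.toNat ([] : List Char))
    = (PySem.List.pyRange 0 C 1).map (pvCol padded C R) := by
  intro R
  induction R with
  | zero =>
    rw [show ((0 : Nat) : Int) = 0 by norm_num, PySem.List.pyRange_one_eq_nil le_rfl]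
    simp only [List.foldl_nil]
    have : (PySem.List.pyRange 0 C 1).map (pvCol padded C 0)
        = (PySem.List.pyRange 0 C 1).map (fun _ => ([] : List Char)) := by
      apply List.map_congr_left; intro j _; simp [pvCol]
    rw [this, List.map_const', PySem.List.length_pyRange_one]
    norm_num
  | succ R ih =>
    rw [show ((R + 1 : Nat) : Int) = (R : Int) + 1 by push_cast; ring,
        PySem.List.pyRange_one_succ_right (by positivity), List.foldl_append]
    rw [ih]
    simp only [List.foldl_cons, List.foldl_nil]
    rw [pvInner (fun j => [PySem.List.pyGetD padded ((R : Int) * C + j) ' ']) C C.toNat 0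
        (pvCol padded C R) le_rfl (by omega)]
    apply List.map_congr_left
    intro j hj
    rw [PySem.List.mem_pyRange_one] at hj
    rw [if_pos hj.1]
    simp [pvCol, List.range_succ]

-- helper: a filterMap that never drops is a map
lemma pvFilterMap_eq_map {α β : Type} (l : List α) (f : α → Option β) (g : α → β)
    (h : ∀ x ∈ l, f x = some (g x)) : l.filterMap f = l.map g := by
  rw [List.filterMap_congr h, show (fun x => some (g x)) = some ∘ g from rfl, List.filterMap_eq_map]

-- B's strided slice padded[j::C] is the canonical column j.
lemma pvSlice_col (padded : List Char) (C : Int) (R : Nat) (j : Int)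
    (h0 : 0 ≤ j) (hj : j < C) (hlen : (padded.length : Int) = (R : Int) * C) :
    (PySem.List.slice? padded (some j) none C).getD [] = pvCol padded C R j := by
  have hC : 0 < C := by omega
  unfold PySem.List.slice? PySem.List.sliceIndices
  rw [if_neg (by omega)]
  simp only [if_neg (by omega : ¬ C < 0), if_pos hC, Option.getD_some]
  rcases Nat.eq_zero_or_pos R with hR | hR
  · subst hR
    have hplen : (padded.length : Int) = 0 := by simpa using hlen
    simp only [if_neg (by omega : ¬ j < 0)]
    simp [pvCol]
    intro a _
    have h0 : padded.length = 0 := by exact_mod_cast hplen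
    simp [h0]
  · have hjlen : j < (padded.length : Int) := by
      have : C ≤ (R : Int) * C := by nlinarith [Int.natCast_pos.mpr hR]
      omega
    rw [if_neg (by omega : ¬ j < 0)]
    rw [if_pos (by omega : min j (padded.length : Int) < (padded.length : Int))]
    have hs : min j (padded.length : Int) = j := by omega
    rw [hs]
    have hcount : ((padded.length : Int) - j + C - 1) / C = (R : Int) := by
      have h1 : (padded.length : Int) - j + C - 1 = (C - 1 - j) + (R : Int) * C := by omega
      rw [h1, Int.add_mul_ediv_right _ _ (by omega : C ≠ 0),
          Int.ediv_eq_zero_of_lt (by omega) (by omega)]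
      ring
    rw [hcount, Int.toNat_natCast]
    unfold pvCol
    apply pvFilterMap_eq_map
    intro k hk
    rw [List.mem_range] at hk
    have h2 : j + (k : Int) * C < (padded.length : Int) := by
      have hkR : (k : Int) + 1 ≤ (R : Int) := by exact_mod_cast hk
      calc j + (k : Int) * C < C + (k : Int) * C := by omega
        _ = ((k : Int) + 1) * C := by ring
        _ ≤ (R : Int) * C := mul_le_mul_of_nonneg_right hkR (by omega)
        _ = (padded.length : Int) := hlen.symm
    have hidx : (j + C * (k : Int)).toNat < padded.length := by
      have h4 : (0 : Int) ≤ j + C * (k : Int) :=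
        add_nonneg h0 (mul_nonneg (by omega) (by positivity))
      have h5 : ((j + C * (k : Int)).toNat : Int) < (padded.length : Int) := by
        rw [Int.toNat_of_nonneg h4, mul_comm]
        exact h2
      exact_mod_cast h5
    rw [List.getElem?_eq_getElem hidx]
    congr 1
    rw [PySem.List.pyGetD_of_nonneg _ _ (by positivity), List.getD_eq_getElem]
    · congr 1
      congr 1
      ring
    · rw [show ((k : Int) * C + j) = j + C * (k : Int) from by ring]
      exact hidx

-- ===== VERDICT (by name: the statement is the Claim_ definition above) =====
theorem super_encrypt_spec : Claim_equal_super_encrypt := by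
  intro plain_text key _hdom hpre
  unfold Spec_super_encrypt
  simp only [super_encrypt, super_encrypt_alt]
  rw [← pvVig_eq]
  set v := pvVigA plain_text.toList key.toList with hv
  set C : Int := (key.toList.length : Int) with hCdef
  have hC : 0 < C := by
    rw [hCdef]
    have : key.toList ≠ [] := by
      intro h; exact hpre (by rwa [← String.toList_eq_nil_iff])
    simpa using List.length_pos_of_ne_nil this
  set numRows : Int := PySem.Int.floordiv ((v.length : Int) + C - 1) C with hnr
  set padded := v ++ List.replicate ((numRows * C).toNat - v.length) ' ' with hpad
  -- numRows ≥ 0 and the padded length is numRows * C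
  have hfd := PySem.Int.floordiv_mul_add_mod ((v.length : Int) + C - 1) C
  have hm1 := PySem.Int.mod_nonneg ((v.length : Int) + C - 1) hC
  have hm2 := PySem.Int.mod_lt ((v.length : Int) + C - 1) hC
  have hge : (v.length : Int) ≤ numRows * C := by rw [hnr]; omega
  have hnr0 : 0 ≤ numRows := by nlinarith [Int.natCast_nonneg v.length]
  have hplen : (padded.length : Int) = (numRows.toNat : Int) * C := by
    rw [hpad]
    simp only [List.length_append, List.length_replicate]
    rw [Int.toNat_of_nonneg hnr0]
    push_cast
    omega
  congr 1
  have hcast : numRows = ((numRows.toNat : Nat) : Int) := (Int.toNat_of_nonneg hnr0).symm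
  rw [hcast, pvOuter padded C hC numRows.toNat]
  refine congrArg (PySem.Chars.join []) (List.map_congr_left ?_)
  intro j hj
  rw [PySem.List.mem_pyRange_one] at hj
  exact (pvSlice_col padded C numRows.toNat j hj.1 hj.2 hplen).symm
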